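-- pv_equiv track=rewrite | github.com/leesangwon393/ACCIDENT-CVPR | Augmentation/arg2.py | detect_video_path_column
-- ===== SOURCE A (Python) =====
-- def detect_video_path_column(fieldnames: list[str]) -> str | None:
--     candidates = [
--         "rgb_path",
--         "path",
--         "video_path",
--         "video",
--         "filepath",
--         "file_path",
--         "filename",
--     ]
--     lowered = {name.lower(): name for name in fieldnames}
--     for candidate in candidates:
--         if candidate in lowered:
--             return lowered[candidate]
--     return None
-- ===== SOURCE B (Python) =====
-- def detect_video_path_column(fieldnames: list[str]) -> str | None:
--     candidates = [
--         "rgb_path",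
--         "path",
--         "video_path",
--         "video",
--         "filepath",
--         "file_path",
--         "filename",
--     ]
--     rank = {name: i for i, name in enumerate(candidates)}
--     best_rank = None
--     best_name = None
--     for name in fieldnames:
--         r = rank.get(name.lower())
--         if r is not None and (best_rank is None or r <= best_rank):
--             best_rank, best_name = r, name
--     return best_name
-- ===== Notes on version B (the rewrite author's own statement) =====
-- stated objective: alternative
-- what changed: Replaces A's two-phase build-a-lowered-dict-then-scan-candidates with a single pass over fieldnames that tracks the best (lowest-rank) match via a precomputed rank dict, using <= on ties to reproduce last-wins overwrite.
import Mathlib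
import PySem

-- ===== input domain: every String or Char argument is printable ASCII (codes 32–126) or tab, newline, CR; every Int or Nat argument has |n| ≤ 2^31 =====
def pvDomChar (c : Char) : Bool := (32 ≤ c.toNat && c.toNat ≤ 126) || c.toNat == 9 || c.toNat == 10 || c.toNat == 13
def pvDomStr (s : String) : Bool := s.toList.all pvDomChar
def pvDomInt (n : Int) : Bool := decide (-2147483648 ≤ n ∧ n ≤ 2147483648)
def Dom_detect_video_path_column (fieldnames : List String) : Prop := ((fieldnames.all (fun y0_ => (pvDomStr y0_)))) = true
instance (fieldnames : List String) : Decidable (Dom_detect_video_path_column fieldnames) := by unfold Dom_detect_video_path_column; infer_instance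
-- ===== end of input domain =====

-- B makes one pass over fieldnames tracking the lowest-ranked candidate match (alternative decomposition, same cost).

-- ===== PORT A =====
def pvCandidates : List String :=
  ["rgb_path", "path", "video_path", "video", "filepath", "file_path", "filename"]

-- the for-loop over candidates: first candidate present in the dict wins
def pvFindCand (d : PySem.Dict String String) : List String → Option String
  | [] => none
  | c :: cs =>
    match d.get? c with
    | some v => some v
    | none => pvFindCand d cs

def detect_video_path_column (fieldnames : List String) : Option String :=
  let lowered := fieldnames.foldl (fun d name => d.insert (PySem.Str.lower name) name) PySem.Dict.empty
  pvFindCand lowered pvCandidates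

-- ===== PORT B =====
def pvRank : PySem.Dict String Int :=
  (PySem.List.enumerate pvCandidates).foldl (fun d p => d.insert p.2 p.1) PySem.Dict.empty

-- the loop body of B: update (best_rank, best_name)
def pvStep (st : Option Int × Option String) (name : String) : Option Int × Option String :=
  match pvRank.get? (PySem.Str.lower name) with
  | none => st
  | some r =>
    match st.1 with
    | none => (some r, some name)
    | some br => if r ≤ br then (some r, some name) else st

def detect_video_path_column_alt (fieldnames : List String) : Option String :=
  (fieldnames.foldl pvStep (none, none)).2

-- ===== PRECONDITION & SPEC =====
def Spec_detect_video_path_column (fieldnames : List String) (out : Option String) : Prop := out = detect_video_path_column_alt fieldnames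
instance (fieldnames : List String) (out : Option String) : Decidable (Spec_detect_video_path_column fieldnames out) := by unfold Spec_detect_video_path_column; infer_instance

-- ===== CLAIM (what is proved, stated in full; the proofs are below) =====
def Claim_equal_detect_video_path_column : Prop := ∀ (fieldnames : List String), Dom_detect_video_path_column fieldnames → Spec_detect_video_path_column fieldnames (detect_video_path_column fieldnames)

-- ===== LEMMAS AND PROOFS =====

-- invariant tying A's dict-so-far to B's (best_rank, best_name) state
def pvRel (d : PySem.Dict String String) (st : Option Int × Option String) : Prop :=
  match st with
  | (none, none) => ∀ c ∈ pvCandidates, d.get? c = none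
  | (some r, some v) => ∃ k : Nat, r = (k : Int) ∧
      (∀ i c, i < k → pvCandidates[i]? = some c → d.get? c = none) ∧
      pvCandidates[k]? = some (PySem.Str.lower v) ∧
      d.get? (PySem.Str.lower v) = some v
  | _ => False

lemma rank_some (s : String) (r : Int) (h : pvRank.get? s = some r) :
    ∃ k : Nat, r = (k : Int) ∧ pvCandidates[k]? = some s := by
  have hm : pvRank = PySem.Dict.mk [("rgb_path", (0:Int)), ("path", 1), ("video_path", 2),
      ("video", 3), ("filepath", 4), ("file_path", 5), ("filename", 6)] := by decide
  rw [hm] at h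
  simp only [PySem.Dict.get?_mk_cons, beq_iff_eq] at h
  split_ifs at h with h0 h1 h2 h3 h4 h5 h6
  · exact ⟨0, by simpa using h.symm, by simp [pvCandidates, h0]⟩
  · exact ⟨1, by simpa using h.symm, by simp [pvCandidates, h1]⟩
  · exact ⟨2, by simpa using h.symm, by simp [pvCandidates, h2]⟩
  · exact ⟨3, by simpa using h.symm, by simp [pvCandidates, h3]⟩
  · exact ⟨4, by simpa using h.symm, by simp [pvCandidates, h4]⟩
  · exact ⟨5, by simpa using h.symm, by simp [pvCandidates, h5]⟩
  · exact ⟨6, by simpa using h.symm, by simp [pvCandidates, h6]⟩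
  · simp [PySem.Dict.get?] at h

lemma rank_of_getElem (i : Nat) (c : String) (h : pvCandidates[i]? = some c) :
    pvRank.get? c = some (i : Int) := by
  have hi : i < 7 := by
    by_contra hge
    rw [List.getElem?_eq_none (by simp [pvCandidates]; omega)] at h
    simp at h
  interval_cases i <;> (simp [pvCandidates] at h; subst h; decide)

lemma rank_mem (c : String) (h : c ∈ pvCandidates) : pvRank.get? c ≠ none := by
  simp [pvCandidates] at h
  rcases h with h|h|h|h|h|h|h <;> subst h <;> decide

lemma rel_step (d : PySem.Dict String String) (st : Option Int × Option String) (x : String)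
    (h : pvRel d st) :
    pvRel (d.insert (PySem.Str.lower x) x) (pvStep st x) := by
  rcases hr : pvRank.get? (PySem.Str.lower x) with _ | r
  · -- lower x is not a candidate: state unchanged, lookups at candidates unchanged
    have hne : ∀ c, c ∈ pvCandidates → c ≠ PySem.Str.lower x := by
      intro c hc he; exact rank_mem c hc (he ▸ hr)
    rcases st with ⟨br, bn⟩
    rcases br with _ | r' <;> rcases bn with _ | v
    · simp only [pvStep, hr, pvRel] at h ⊢
      intro c hc
      rw [PySem.Dict.get?_insert_of_ne _ _ (hne c hc)]
      exact h c hc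
    · exact h.elim
    · exact h.elim
    · simp only [pvStep, hr, pvRel] at h ⊢
      obtain ⟨k, hk, hlt, hat, hd⟩ := h
      refine ⟨k, hk, ?_, hat, ?_⟩
      · intro i c hik hic
        rw [PySem.Dict.get?_insert_of_ne _ _ (hne c (List.mem_of_getElem? hic))]
        exact hlt i c hik hic
      · rw [PySem.Dict.get?_insert_of_ne _ _ (hne _ (List.mem_of_getElem? hat))]
        exact hd
  · obtain ⟨k', hk', hat'⟩ := rank_some _ _ hr
    rcases st with ⟨br, bn⟩
    rcases br with _ | rb <;> rcases bn with _ | v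
    · -- nothing found yet: take x
      simp only [pvStep, hr, pvRel] at h ⊢
      refine ⟨k', hk', ?_, hat', PySem.Dict.get?_insert_self _ _ _⟩
      · intro i c hik hic
        have : c ≠ PySem.Str.lower x := by
          intro he
          have := rank_of_getElem i c hic
          rw [he, hr] at this
          simp [hk'] at this; omega
        rw [PySem.Dict.get?_insert_of_ne _ _ this]
        exact h c (List.mem_of_getElem? hic)
    · exact h.elim
    · exact h.elim
    · simp only [pvRel] at h
      obtain ⟨kb, hkb, hlt, hat, hd⟩ := h
      simp only [pvStep, hr, hkb]
      by_cases hle : (r : Int) ≤ (kb : Int)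
      · -- new match is at least as good: overwrite
        have hkk : k' ≤ kb := by rw [hk'] at hle; exact_mod_cast hle
        simp only [if_pos hle, pvRel]
        refine ⟨k', hk', ?_, hat', PySem.Dict.get?_insert_self _ _ _⟩
        intro i c hik hic
        have : c ≠ PySem.Str.lower x := by
          intro he
          have := rank_of_getElem i c hic
          rw [he, hr] at this
          simp [hk'] at this; omega
        rw [PySem.Dict.get?_insert_of_ne _ _ this]
        exact hlt i c (by omega) hic
      · -- old match is strictly better: keep state
        have hkk : kb < k' := by rw [hk'] at hle; omega
        simp only [if_neg hle, pvRel]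
        have hxne : ∀ i c, i ≠ k' → pvCandidates[i]? = some c → c ≠ PySem.Str.lower x := by
          intro i c hik hic he
          have := rank_of_getElem i c hic
          rw [he, hr] at this
          simp [hk'] at this; omega
        refine ⟨kb, rfl, ?_, hat, ?_⟩
        · intro i c hik hic
          rw [PySem.Dict.get?_insert_of_ne _ _ (hxne i c (by omega) hic)]
          exact hlt i c hik hic
        · rw [PySem.Dict.get?_insert_of_ne _ _ (hxne kb _ (by omega) hat)]
          exact hd

lemma rel_fold (xs : List String) (d : PySem.Dict String String)
    (st : Option Int × Option String) (h : pvRel d st) :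
    pvRel (xs.foldl (fun d name => d.insert (PySem.Str.lower name) name) d) (xs.foldl pvStep st) := by
  induction xs generalizing d st with
  | nil => exact h
  | cons x xs ih => exact ih _ _ (rel_step d st x h)

lemma pvFindCand_eq (cs : List String) (d : PySem.Dict String String) (k : Nat) (v w : String)
    (hlt : ∀ i c, i < k → cs[i]? = some c → d.get? c = none)
    (hat : cs[k]? = some w) (hd : d.get? w = some v) :
    pvFindCand d cs = some v := by
  induction cs generalizing k with
  | nil => simp at hat
  | cons c cs ih =>
    cases k with
    | zero =>
      simp at hat
      subst hat
      simp [pvFindCand, hd]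
    | succ k =>
      have h0 : d.get? c = none := hlt 0 c (Nat.succ_pos k) (by simp)
      simp at hat
      simp only [pvFindCand, h0]
      exact ih k (fun i c' hik hic => hlt (i + 1) c' (by omega) (by simpa using hic)) hat

lemma rel_find (d : PySem.Dict String String) (st : Option Int × Option String)
    (h : pvRel d st) : pvFindCand d pvCandidates = st.2 := by
  rcases st with ⟨br, bn⟩
  rcases br with _ | r <;> rcases bn with _ | v
  · simp only [pvRel] at h
    have h0 := h "rgb_path" (by decide)
    have h1 := h "path" (by decide)
    have h2 := h "video_path" (by decide)
    have h3 := h "video" (by decide)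
    have h4 := h "filepath" (by decide)
    have h5 := h "file_path" (by decide)
    have h6 := h "filename" (by decide)
    simp [pvCandidates, pvFindCand, h0, h1, h2, h3, h4, h5, h6]
  · exact h.elim
  · exact h.elim
  · simp only [pvRel] at h
    obtain ⟨k, hk, hlt, hat, hd⟩ := h
    exact pvFindCand_eq pvCandidates d k v _ hlt hat hd

lemma rel_empty : pvRel PySem.Dict.empty ((none, none) : Option Int × Option String) := by
  intro c _
  rfl

-- ===== VERDICT (by name: the statement is the Claim_ definition above) =====
theorem detect_video_path_column_spec : Claim_equal_detect_video_path_column := by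
  intro fieldnames _
  show _ = _
  unfold detect_video_path_column detect_video_path_column_alt
  exact rel_find _ _ (rel_fold fieldnames _ _ rel_empty)
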